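-- pv_equiv track=rewrite | github.com/Scalas/Programmers | solution/sol43165.py | solution
-- ===== SOURCE A (Python) =====
-- def solution(numbers, target):
--     n = len(numbers)
--
--     # 주어진 수의 합에서 target의 절댓값을 뺀 나머지를 구함
--     remain = sum(numbers) - abs(target)
--
--     # 나머지가 0 미만이거나 홀수라면 target을 만들 방법이 없음
--     if remain < 0 or remain % 2:
--         return 0
--
--     # 나머지가 0 이라면 방법은 하나뿐
--     if not remain:
--         return 1
--
--     # 주어진 수 중에서 일부를 골라 그 합이 remain // 2 가 되는 경우의 수를 구함
--     remain //= 2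
--     dp = [[-1] * (remain + 1) for _ in range(n)]
--
--     def dfs(cur, total):
--         if cur == n:
--             if total == remain:
--                 return 1
--             return 0
--
--         if dp[cur][total] < 0:
--             res = 0
--
--             if total + numbers[cur] <= remain:
--                 res += dfs(cur + 1, total + numbers[cur])
--
--             res += dfs(cur + 1, total)
--             dp[cur][total] = res
--
--         return dp[cur][total]
--
--     return dfs(0, 0)
-- ===== SOURCE B (Python) =====
-- def solution(numbers, target):
--     remain = sum(numbers) - abs(target)
--     if remain < 0 or remain % 2:
--         return 0
--     if not remain:
--         return 1
--     remain //= 2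
--     dp = [1] + [0] * remain
--     for num in numbers:
--         dp = [dp[s] + (dp[s - num] if num <= s else 0) for s in range(remain + 1)]
--     return dp[remain]
-- ===== Notes on version B (the rewrite author's own statement) =====
-- stated objective: idiomatic
-- what changed: Replaced the memoized recursive dfs over (position,total) plus a preallocated n x (remain+1) memo table by a bottom-up 1-D subset-sum DP that rebuilds one (remain+1)-length count table per number with a list comprehension; the three early guards are unchanged.
-- outside the precondition, e.g. on solution([3, -1], 0): A returns 0, B raises IndexError; on solution([2, -2, 4], 0): A returns 2, B raises IndexError
import Mathlib
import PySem

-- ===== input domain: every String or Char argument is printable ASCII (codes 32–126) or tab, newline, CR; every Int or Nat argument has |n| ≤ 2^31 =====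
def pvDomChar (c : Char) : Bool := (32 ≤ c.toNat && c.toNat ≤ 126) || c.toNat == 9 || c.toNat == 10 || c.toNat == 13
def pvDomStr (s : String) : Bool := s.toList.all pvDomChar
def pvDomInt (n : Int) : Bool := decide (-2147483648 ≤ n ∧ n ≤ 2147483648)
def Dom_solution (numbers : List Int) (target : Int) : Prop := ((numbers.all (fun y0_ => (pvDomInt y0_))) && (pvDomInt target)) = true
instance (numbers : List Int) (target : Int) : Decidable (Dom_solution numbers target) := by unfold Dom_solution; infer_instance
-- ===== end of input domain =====

-- B replaces A's memoized recursion over (position, total) by a bottom-up 1-D subset-sum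
-- count table rebuilt per number (same guards, same cost class); equivalence is about the
-- return value only.

-- ===== PORT A =====
-- dp[i][j] read/write; Python index semantics via pyGetD/pySetD (inside Pre_ all accesses
-- are in range; out-of-range reads — Python IndexError — are outside Pre_).
def pvGetCell (dp : List (List Int)) (i : Int) (j : Int) : Int :=
  PySem.List.pyGetD (PySem.List.pyGetD dp i []) j (-1)

def pvSetCell (dp : List (List Int)) (i : Int) (j : Int) (v : Int) : List (List Int) :=
  PySem.List.pySetD dp i (PySem.List.pySetD (PySem.List.pyGetD dp i []) j v)

-- the inner `dfs(cur, total)` with its memo table threaded through; fuel = n+1 bounds the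
-- recursion depth (each call increases cur by 1 and stops at cur = n), so the 0 case is
-- unreachable from `solution`.
def pvDfs (numbers : List Int) (n : Int) (remain : Int) :
    Nat → Int → Int → List (List Int) → Int × List (List Int)
  | 0, _, _, dp => (0, dp)
  | fuel + 1, cur, total, dp =>
    if cur = n then
      (if total = remain then 1 else 0, dp)
    else if pvGetCell dp cur total < 0 then
      let p1 := if total + PySem.List.pyGetD numbers cur 0 ≤ remain then
                  pvDfs numbers n remain fuel (cur + 1) (total + PySem.List.pyGetD numbers cur 0) dp
                else (0, dp)
      let p2 := pvDfs numbers n remain fuel (cur + 1) total p1.2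
      let dp' := pvSetCell p2.2 cur total (p1.1 + p2.1)
      (pvGetCell dp' cur total, dp')
    else
      (pvGetCell dp cur total, dp)

def solution (numbers : List Int) (target : Int) : Int :=
  let n : Int := numbers.length
  let remain := numbers.sum - |target|
  if remain < 0 ∨ PySem.Int.mod remain 2 ≠ 0 then 0
  else if remain = 0 then 1
  else
    let remain2 := PySem.Int.floordiv remain 2
    let dp := List.replicate n.toNat (List.replicate (remain2 + 1).toNat (-1))
    (pvDfs numbers n remain2 (n.toNat + 1) 0 0 dp).1

-- ===== PORT B =====
def solution_alt (numbers : List Int) (target : Int) : Int :=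
  let remain := numbers.sum - |target|
  if remain < 0 ∨ PySem.Int.mod remain 2 ≠ 0 then 0
  else if remain = 0 then 1
  else
    let remain2 := PySem.Int.floordiv remain 2
    let dp0 : List Int := 1 :: List.replicate remain2.toNat 0
    let dp := numbers.foldl
      (fun dp num => (PySem.List.pyRange 0 (remain2 + 1) 1).map
        (fun s => PySem.List.pyGetD dp s 0 +
          (if num ≤ s then PySem.List.pyGetD dp (s - num) 0 else 0))) dp0
    PySem.List.pyGetD dp remain2 0

-- ===== PRECONDITION & SPEC =====
-- Pre_ excludes only lists with a negative element that actually reach the search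
-- (sum - |target| positive and even): there A's dfs indexes its memo rows by negative
-- running totals, so Python's negative-index wraparound aliases memo cells (an accidental
-- value) or raises IndexError; when sum - |target| is ≤ 0 or odd both programs return at
-- the guards and such inputs stay inside Pre_.
def Pre_solution (numbers : List Int) (target : Int) : Prop :=
  (∀ x ∈ numbers, 0 ≤ x) ∨ numbers.sum - |target| ≤ 0 ∨ PySem.Int.mod (numbers.sum - |target|) 2 ≠ 0
instance (numbers : List Int) (target : Int) : Decidable (Pre_solution numbers target) := by
  unfold Pre_solution; infer_instance

def pvWitness_solution : List Int × Int := ([1, 2, 3, 2], 2)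

def Spec_solution (numbers : List Int) (target : Int) (out : Int) : Prop := out = solution_alt numbers target
instance (numbers : List Int) (target : Int) (out : Int) : Decidable (Spec_solution numbers target out) := by unfold Spec_solution; infer_instance

-- ===== CLAIM (what is proved, stated in full; the proofs are below) =====
def Claim_equal_solution : Prop := ∀ (numbers : List Int) (target : Int), Dom_solution numbers target → Pre_solution numbers target → Spec_solution numbers target (solution numbers target)

-- ===== LEMMAS AND PROOFS =====

-- cnt xs t = number of subsets of xs summing to t (the mathematical value both programs compute)
def cnt : List Int → Int → Int
  | [], t => if t = 0 then 1 else 0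
  | x :: xs, t => cnt xs (t - x) + cnt xs t

theorem cnt_neg (xs : List Int) (t : Int) (hx : ∀ x ∈ xs, 0 ≤ x) (ht : t < 0) : cnt xs t = 0 := by
  induction xs generalizing t with
  | nil => simp [cnt]; omega
  | cons x xs ih =>
    have hx0 : 0 ≤ x := hx x (by simp)
    have h1 := ih (t - x) (fun y hy => hx y (by simp [hy])) (by omega)
    have h2 := ih t (fun y hy => hx y (by simp [hy])) ht
    simp [cnt, h1, h2]

theorem cnt_append (xs : List Int) (x : Int) (t : Int) :
    cnt (xs ++ [x]) t = cnt xs (t - x) + cnt xs t := by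
  induction xs generalizing t with
  | nil => simp [cnt]
  | cons y ys ih =>
    simp only [List.cons_append, cnt, ih]
    rw [show t - y - x = t - x - y by ring]; ring

-- generic getD/set helpers
theorem pvGetD_set_self {α : Type} (l : List α) (i : Nat) (a d : α) (h : i < l.length) :
    (l.set i a).getD i d = a := by
  simp [List.getD_eq_getElem?_getD, h]

theorem pvGetD_set_ne {α : Type} (l : List α) (i j : Nat) (a d : α) (h : i ≠ j) :
    (l.set i a).getD j d = l.getD j d := by
  simp [List.getD_eq_getElem?_getD, List.getElem?_set_ne h]

-- ===== B side: the folded 1-D table holds subset counts =====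
theorem pvStepB_len (r : Int) (hr : 0 ≤ r) (dp : List Int) (num : Int) :
    ((PySem.List.pyRange 0 (r + 1) 1).map
      (fun s => PySem.List.pyGetD dp s 0 +
        (if num ≤ s then PySem.List.pyGetD dp (s - num) 0 else 0))).length = r.toNat + 1 := by
  simp [PySem.List.length_pyRange_one]; omega

theorem pvStepB_getD (r : Int) (hr : 0 ≤ r) (L : List Int) (x : Int) (hx : 0 ≤ x)
    (l : List Int) (hl : ∀ y ∈ l, 0 ≤ y)
    (hval : ∀ j : Nat, j ≤ r.toNat → L.getD j 0 = cnt l (j : Int)) (j : Nat) (hj : j ≤ r.toNat) :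
    ((PySem.List.pyRange 0 (r + 1) 1).map
      (fun s => PySem.List.pyGetD L s 0 +
        (if x ≤ s then PySem.List.pyGetD L (s - x) 0 else 0))).getD j 0 = cnt (l ++ [x]) (j : Int) := by
  have h1 : ((PySem.List.pyRange 0 (r + 1) 1).map
      (fun s => PySem.List.pyGetD L s 0 +
        (if x ≤ s then PySem.List.pyGetD L (s - x) 0 else 0))).getD j 0
      = PySem.List.pyGetD ((PySem.List.pyRange 0 (r + 1) 1).map
      (fun s => PySem.List.pyGetD L s 0 +
        (if x ≤ s then PySem.List.pyGetD L (s - x) 0 else 0))) (j : Int) 0 := by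
    simp
  rw [h1, PySem.List.pyGetD_map_pyRange_of_nonneg _ _ _ _ (by positivity) (by omega)]
  rw [cnt_append]
  by_cases hxj : x ≤ (j : Int)
  · have hk : (((((j : Int) - x).toNat : Nat)) : Int) = (j : Int) - x := by omega
    rw [if_pos hxj, ← hk]
    simp only [PySem.List.pyGetD_natCast]
    rw [hval j hj, hval (((j : Int) - x).toNat) (by omega), hk]
    ring
  · rw [if_neg hxj]
    have h0 : cnt l ((j : Int) - x) = 0 := cnt_neg l _ hl (by omega)
    simp only [PySem.List.pyGetD_natCast]
    rw [hval j hj, h0]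
    ring

theorem pvFoldB_correct (r : Int) (hr : 0 ≤ r) (l : List Int) (hl : ∀ x ∈ l, 0 ≤ x) :
    (l.foldl
      (fun dp num => (PySem.List.pyRange 0 (r + 1) 1).map
        (fun s => PySem.List.pyGetD dp s 0 +
          (if num ≤ s then PySem.List.pyGetD dp (s - num) 0 else 0)))
      ((1 : Int) :: List.replicate r.toNat (0 : Int))).length = r.toNat + 1 ∧
    ∀ j : Nat, j ≤ r.toNat →
      (l.foldl
        (fun dp num => (PySem.List.pyRange 0 (r + 1) 1).map
          (fun s => PySem.List.pyGetD dp s 0 +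
            (if num ≤ s then PySem.List.pyGetD dp (s - num) 0 else 0)))
        ((1 : Int) :: List.replicate r.toNat (0 : Int))).getD j 0 = cnt l (j : Int) := by
  induction l using List.reverseRecOn with
  | nil =>
    refine ⟨by simp, fun j hj => ?_⟩
    rcases Nat.eq_zero_or_pos j with h0 | hpos
    · subst h0; simp [cnt]
    · have hne : ((j : Int) = 0) = False := by simp; omega
      simp only [List.foldl_nil, cnt, hne, if_false]
      rcases j with _ | j
      · omega
      · simp [List.getElem?_replicate]
        split <;> simp
  | append_singleton l x ih =>
    have hx : 0 ≤ x := hl x (by simp)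
    obtain ⟨ihlen, ihval⟩ := ih (fun y hy => hl y (by simp [hy]))
    simp only [List.foldl_append, List.foldl_cons, List.foldl_nil]
    constructor
    · exact pvStepB_len r hr (List.foldl
        (fun dp num => (PySem.List.pyRange 0 (r + 1) 1).map
          (fun s => PySem.List.pyGetD dp s 0 +
            (if num ≤ s then PySem.List.pyGetD dp (s - num) 0 else 0)))
        ((1 : Int) :: List.replicate r.toNat (0 : Int)) l) x
    · intro j hj
      exact pvStepB_getD r hr (List.foldl
        (fun dp num => (PySem.List.pyRange 0 (r + 1) 1).map
          (fun s => PySem.List.pyGetD dp s 0 +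
            (if num ≤ s then PySem.List.pyGetD dp (s - num) 0 else 0)))
        ((1 : Int) :: List.replicate r.toNat (0 : Int)) l) x hx l (fun y hy => hl y (by simp [hy])) ihval j hj

-- ===== A side: the memo table is partially-correct and dfs returns the subset count =====
def pvInv (numbers : List Int) (r : Int) (dp : List (List Int)) : Prop :=
  dp.length = numbers.length ∧
  (∀ i : Nat, i < numbers.length → (dp.getD i []).length = r.toNat + 1) ∧
  (∀ i j : Nat, i < numbers.length → j ≤ r.toNat →
    (dp.getD i []).getD j (-1) = -1 ∨
    (dp.getD i []).getD j (-1) = cnt (numbers.drop i) (r - (j : Int)))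

theorem pvGetCell_cast (dp : List (List Int)) (i j : Nat) :
    pvGetCell dp (i : Int) (j : Int) = (dp.getD i []).getD j (-1) := by
  simp [pvGetCell]

theorem pvSetCell_cast (dp : List (List Int)) (i j : Nat) (v : Int) :
    pvSetCell dp (i : Int) (j : Int) v = dp.set i ((dp.getD i []).set j v) := by
  simp [pvSetCell]

theorem pvInv_set (numbers : List Int) (r : Int) (dp : List (List Int)) (cur j : Nat)
    (hinv : pvInv numbers r dp) (hcur : cur < numbers.length) (hj : j ≤ r.toNat)
    (v : Int) (hv : v = cnt (numbers.drop cur) (r - (j : Int))) :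
    pvInv numbers r (dp.set cur ((dp.getD cur []).set j v)) := by
  obtain ⟨hlen, hrow, hent⟩ := hinv
  refine ⟨by simp [hlen], ?_, ?_⟩
  · intro i hi
    by_cases hic : i = cur
    · subst hic; rw [pvGetD_set_self dp i _ _ (by omega), List.length_set]; exact hrow i hi
    · rw [pvGetD_set_ne dp cur i _ _ (fun h => hic h.symm)]; exact hrow i hi
  · intro i j' hi hj'
    by_cases hic : i = cur
    · subst hic
      rw [pvGetD_set_self dp i _ _ (by omega)]
      by_cases hjj : j' = j
      · subst hjj
        right
        rw [pvGetD_set_self _ j' _ _ (by rw [hrow i hi]; omega), hv]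
      · rw [pvGetD_set_ne _ j j' _ _ (fun h => hjj h.symm)]
        exact hent i j' hi hj'
    · rw [pvGetD_set_ne dp cur i _ _ (fun h => hic h.symm)]
      exact hent i j' hi hj'

theorem pvDfs_correct (numbers : List Int) (r : Int) (hr : 0 ≤ r)
    (hnn : ∀ x ∈ numbers, 0 ≤ x) :
    ∀ (fuel : Nat) (cur : Nat) (total : Int) (dp : List (List Int)),
      cur ≤ numbers.length → numbers.length - cur < fuel → 0 ≤ total → total ≤ r →
      pvInv numbers r dp →
      (pvDfs numbers (numbers.length : Int) r fuel (cur : Int) total dp).1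
          = cnt (numbers.drop cur) (r - total) ∧
      pvInv numbers r (pvDfs numbers (numbers.length : Int) r fuel (cur : Int) total dp).2 := by
  intro fuel
  induction fuel with
  | zero => intro cur total dp hc hf; exact absurd hf (by omega)
  | succ f ih =>
    intro cur total dp hcur hfuel ht0 htr hinv
    by_cases hcn : cur = numbers.length
    · subst hcn
      simp only [pvDfs, if_pos]
      refine ⟨?_, hinv⟩
      rw [List.drop_length]
      simp only [cnt]
      split_ifs <;> omega
    · have hlt : cur < numbers.length := by omega
      have hj : (total.toNat : Int) = total := Int.toNat_of_nonneg ht0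
      set j : Nat := total.toNat with hjdef
      rw [← hj]
      have hne : ((cur : Int) = (numbers.length : Int)) = False := by simp; omega
      have hcast1 : ((cur : Int) + 1) = ((cur + 1 : Nat) : Int) := by push_cast; ring
      simp only [pvDfs, hne, if_false, pvGetCell_cast, hcast1]
      have hx : PySem.List.pyGetD numbers (cur : Int) 0 = numbers[cur] := by
        simp [List.getD_eq_getElem?_getD, List.getElem?_eq_getElem hlt]
      have hx0 : 0 ≤ numbers[cur] := hnn _ (List.getElem_mem hlt)
      have hdrop : numbers.drop cur = numbers[cur] :: numbers.drop (cur + 1) :=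
        (List.getElem_cons_drop hlt).symm
      have hcnt : cnt (numbers.drop cur) (r - (j : Int)) =
          cnt (numbers.drop (cur + 1)) (r - (j : Int) - numbers[cur]) +
          cnt (numbers.drop (cur + 1)) (r - (j : Int)) := by
        rw [hdrop]; simp [cnt]
      by_cases hmiss : (dp.getD cur []).getD j (-1) < 0
      · rw [if_pos hmiss]
        by_cases hg : (j : Int) + PySem.List.pyGetD numbers (cur : Int) 0 ≤ r
        · rw [if_pos hg]
          have ih1 := ih (cur + 1) ((j : Int) + PySem.List.pyGetD numbers (cur : Int) 0) dp
            (by omega) (by omega) (by rw [hx]; omega) (by rw [hx] at hg; rw [hx]; omega) hinv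
          have ih2 := ih (cur + 1) (j : Int)
            (pvDfs numbers (numbers.length : Int) r f ((cur + 1 : Nat) : Int)
              ((j : Int) + PySem.List.pyGetD numbers (cur : Int) 0) dp).2
            (by omega) (by omega) (by omega) (by omega) ih1.2
          have harg : r - ((j : Int) + PySem.List.pyGetD numbers (cur : Int) 0)
              = r - (j : Int) - numbers[cur] := by rw [hx]; ring
          have hvtot : (pvDfs numbers (numbers.length : Int) r f ((cur + 1 : Nat) : Int)
                ((j : Int) + PySem.List.pyGetD numbers (cur : Int) 0) dp).1 +
              (pvDfs numbers (numbers.length : Int) r f ((cur + 1 : Nat) : Int) ((j : Int))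
                (pvDfs numbers (numbers.length : Int) r f ((cur + 1 : Nat) : Int)
                  ((j : Int) + PySem.List.pyGetD numbers (cur : Int) 0) dp).2).1
              = cnt (numbers.drop cur) (r - (j : Int)) := by
            rw [ih1.1, ih2.1, harg, hcnt]
          rw [pvSetCell_cast]
          have hrow2 := ih2.2.2.1
          constructor
          · rw [pvGetD_set_self _ cur _ _ (by rw [ih2.2.1]; omega),
              pvGetD_set_self _ j _ _ (by rw [hrow2 cur hlt]; omega)]
            exact hvtot
          · exact pvInv_set numbers r _ cur j ih2.2 hlt (by omega) _ hvtot
        · rw [if_neg hg]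
          rw [hx] at hg
          have hz : cnt (numbers.drop (cur + 1)) (r - (j : Int) - numbers[cur]) = 0 :=
            cnt_neg _ _ (fun y hy => hnn y (List.mem_of_mem_drop hy)) (by omega)
          have ih2 := ih (cur + 1) (j : Int) dp (by omega) (by omega) (by omega) (by omega) hinv
          have hvtot : (0 : Int) +
              (pvDfs numbers (numbers.length : Int) r f ((cur + 1 : Nat) : Int) ((j : Int)) dp).1
              = cnt (numbers.drop cur) (r - (j : Int)) := by
            rw [ih2.1, hcnt, hz]
          rw [pvSetCell_cast]
          have hrow2 := ih2.2.2.1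
          constructor
          · rw [pvGetD_set_self _ cur _ _ (by rw [ih2.2.1]; omega),
              pvGetD_set_self _ j _ _ (by rw [hrow2 cur hlt]; omega)]
            exact hvtot
          · exact pvInv_set numbers r _ cur j ih2.2 hlt (by omega) _ hvtot
      · rw [if_neg hmiss]
        refine ⟨?_, hinv⟩
        rcases hinv.2.2 cur j hlt (by omega) with hm | hm
        · omega
        · exact hm

-- ===== VERDICT (by name: the statement is the Claim_ definition above) =====
theorem pvGetD_toNat (L : List Int) (r : Int) (hr : 0 ≤ r) (c : Int)
    (h : L.getD r.toNat 0 = c) : PySem.List.pyGetD L r 0 = c := by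
  rw [← Int.toNat_of_nonneg hr, PySem.List.pyGetD_natCast, h]

theorem pvRepl_getD {α : Type} (n i : Nat) (a d : α) :
    (List.replicate n a).getD i d = if i < n then a else d := by
  simp [List.getD_eq_getElem?_getD, List.getElem?_replicate]; split <;> simp

theorem solution_spec : Claim_equal_solution := by
  intro numbers target _hdom hpre
  unfold Spec_solution
  simp only [solution, solution_alt]
  split_ifs with h1 h2
  · rfl
  · rfl
  · push Not at h1
    obtain ⟨hge, hmod⟩ := h1
    have hpos : 0 < numbers.sum - |target| := by omega
    have hnn : ∀ x ∈ numbers, 0 ≤ x := by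
      rcases hpre with h | h | h
      · exact h
      · exact absurd h (by omega)
      · exact absurd hmod h
    have hr : 0 ≤ PySem.Int.floordiv (numbers.sum - |target|) 2 := by
      rw [PySem.Int.floordiv_eq_ediv_of_pos (by norm_num)]
      exact Int.ediv_nonneg (by omega) (by norm_num)
    have hmain := pvDfs_correct numbers (PySem.Int.floordiv (numbers.sum - |target|) 2) hr hnn
      (numbers.length + 1) 0 0
      (List.replicate numbers.length
        (List.replicate ((PySem.Int.floordiv (numbers.sum - |target|) 2).toNat + 1) (-1)))
      (by omega) (by omega) le_rfl hr
      ⟨by simp, by intro i hi; rw [pvRepl_getD, if_pos hi]; simp, by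
        intro i j hi hj
        left
        rw [pvRepl_getD, if_pos hi, pvRepl_getD]
        split <;> rfl⟩
    have hfold := pvFoldB_correct (PySem.Int.floordiv (numbers.sum - |target|) 2) hr numbers hnn
    have ht1 : ((numbers.length : Int)).toNat = numbers.length := by simp
    have ht2 : (PySem.Int.floordiv (numbers.sum - |target|) 2 + 1).toNat
        = (PySem.Int.floordiv (numbers.sum - |target|) 2).toNat + 1 := by omega
    simp only [Nat.cast_zero] at hmain
    rw [ht1, ht2, hmain.1, pvGetD_toNat _ _ hr _ (hfold.2 _ le_rfl)]
    rw [List.drop_zero, sub_zero, Int.toNat_of_nonneg hr]
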